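-- pv_equiv track=rewrite | github.com/alexanderpils/fixkostenzuschuss | fixkostenzuschuss/FKZ_800.py | _valid_combination
-- ===== SOURCE A (Python) =====
-- from typing import List, Tuple, Union
--
-- MAX_GAP = 1
--
-- def _valid_combination(arr: Union[List[int], Tuple[int, ...]]) -> bool:
--     """Checks if the vector arr is a possible month combination for the governmental support.
--     This means the vector is only allowed to have two consecutive periods e.g. [2,3,4,6,7,8]
--
--     Args:
--         arr (Union[List[int], Tuple[int, ...]]): A Vector with numerated month combination
--
--     Returns:
--         bool: If it is a valid combination or not
--     """
--     arr = sorted(arr)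
--     gap_counter = 0
--     if len(arr) > 2:
--         for i in range(len(arr) - 1):
--             if arr[i + 1] - arr[i] > 1:
--                 gap_counter += 1
--     return gap_counter <= MAX_GAP
-- ===== SOURCE B (Python) =====
-- def _valid_combination(arr):
--     # A run-start is a distinct value x whose predecessor x-1 is absent.
--     # The sorted vector has (number of runs - 1) gaps, so "at most one gap"
--     # is exactly "at most two runs".
--     s = set(arr)
--     starts = sum(1 for x in s if x - 1 not in s)
--     return starts <= 2
-- ===== Notes on version B (the rewrite author's own statement) =====
-- stated objective: idiomatic
-- what changed: Replaced sort-then-scan of adjacent differences by a single set of the values and a count of run-starts (elements x with x-1 absent), returning starts <= 2; no sorting and no index arithmetic.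
import Mathlib
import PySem

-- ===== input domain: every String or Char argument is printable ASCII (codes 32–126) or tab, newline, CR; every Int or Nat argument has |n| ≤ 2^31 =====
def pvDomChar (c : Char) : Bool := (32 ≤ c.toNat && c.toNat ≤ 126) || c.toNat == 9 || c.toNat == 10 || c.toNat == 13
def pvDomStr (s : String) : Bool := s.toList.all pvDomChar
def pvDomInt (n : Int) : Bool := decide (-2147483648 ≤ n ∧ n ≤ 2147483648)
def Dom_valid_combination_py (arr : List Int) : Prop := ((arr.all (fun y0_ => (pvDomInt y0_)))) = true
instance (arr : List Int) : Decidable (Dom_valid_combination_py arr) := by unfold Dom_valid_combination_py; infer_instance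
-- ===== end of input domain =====

-- B replaces A's sort + adjacent-difference gap count by a set of the values and a
-- count of run-starts (elements x with x-1 absent): at most one gap ↔ at most two runs.

-- ===== PORT A =====
def valid_combination_py (arr : List Int) : Bool :=
  let arr2 := PySem.List.sorted arr (fun x => x) false
  let gap : Int :=
    if 2 < arr2.length then
      (PySem.List.pyRange 0 ((arr2.length : Int) - 1) 1).foldl
        (fun g i =>
          if 1 < PySem.List.pyGetD arr2 (i + 1) 0 - PySem.List.pyGetD arr2 i 0 then g + 1 else g)
        0
    else 0
  decide (gap ≤ 1)

-- ===== PORT B =====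
def valid_combination_py_alt (arr : List Int) : Bool :=
  let s : PySem.Set Int := PySem.Set.ofList arr
  let starts : Int := (s.map (fun x => if PySem.Set.contains s (x - 1) then (0 : Int) else 1)).sum
  decide (starts ≤ 2)

-- ===== PRECONDITION & SPEC =====
def Spec_valid_combination_py (arr : List Int) (out : Bool) : Prop := out = valid_combination_py_alt arr
instance (arr : List Int) (out : Bool) : Decidable (Spec_valid_combination_py arr out) := by unfold Spec_valid_combination_py; infer_instance

-- ===== CLAIM (what is proved, stated in full; the proofs are below) =====
def Claim_equal_valid_combination_py : Prop := ∀ (arr : List Int), Dom_valid_combination_py arr → Spec_valid_combination_py arr (valid_combination_py arr)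

-- ===== LEMMAS AND PROOFS =====

/-- Number of adjacent gaps (difference > 1), as A's loop counts them on the sorted list. -/
def countGaps : List Int → Int
  | a :: b :: t => (if 1 < b - a then 1 else 0) + countGaps (b :: t)
  | _ => 0

lemma pyGetD_cons (r : List Int) (a : Int) (i : Int) (hi : 0 ≤ i) :
    PySem.List.pyGetD (a :: r) (i + 1) 0 = PySem.List.pyGetD r i 0 := by
  rw [PySem.List.pyGetD_of_nonneg _ _ (by omega : (0:Int) ≤ i + 1),
      PySem.List.pyGetD_of_nonneg _ _ hi]
  have : (i + 1).toNat = i.toNat + 1 := by omega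
  simp [this]

lemma pyRange_shift (n : Int) :
    PySem.List.pyRange 1 (n + 1) 1 = (PySem.List.pyRange 0 n 1).map (fun i => i + 1) := by
  rw [PySem.List.pyRange_one, PySem.List.pyRange_one]
  simp only [List.map_map, add_sub_cancel_right, sub_zero]
  exact List.map_congr_left (fun k _ => by simp; omega)

/-- A's index loop computes `countGaps` of the list it scans. -/
lemma foldGaps (s : List Int) (c : Int) :
    (PySem.List.pyRange 0 ((s.length : Int) - 1) 1).foldl
      (fun g i =>
        if 1 < PySem.List.pyGetD s (i + 1) 0 - PySem.List.pyGetD s i 0 then g + 1 else g)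
      c = c + countGaps s := by
  induction s generalizing c with
  | nil => simp [PySem.List.pyRange_one_eq_nil, countGaps]
  | cons a s ih =>
    match s, ih with
    | [], _ => simp [PySem.List.pyRange_one_eq_nil, countGaps]
    | b :: t, ih =>
      have hlen : ((a :: b :: t).length : Int) - 1 = (t.length : Int) + 1 := by
        simp only [List.length_cons]; push_cast; ring
      rw [hlen, PySem.List.pyRange_one_cons (by omega : (0:Int) < (t.length : Int) + 1)]
      rw [List.foldl_cons]
      have h0 : PySem.List.pyGetD (a :: b :: t) (0 + 1) 0 = b := by
        rw [PySem.List.pyGetD_of_nonneg _ _ (by omega : (0:Int) ≤ 0 + 1)]; rfl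
      have h0' : PySem.List.pyGetD (a :: b :: t) 0 0 = a := by
        rw [PySem.List.pyGetD_of_nonneg _ _ (by omega : (0:Int) ≤ 0)]; rfl
      rw [h0, h0']
      simp only [zero_add]
      rw [pyRange_shift, List.foldl_map]
      rw [PySem.List.foldl_congr_mem _ _
        (fun g i => if 1 < PySem.List.pyGetD (b :: t) (i + 1) 0 - PySem.List.pyGetD (b :: t) i 0 then g + 1 else g)
        _ ?_]
      · have hb : ((t.length : Int)) = ((b :: t).length : Int) - 1 := by simp
        rw [hb, ih]
        simp only [countGaps]
        split_ifs <;> omega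
      · intro acc x hx
        have hx0 : 0 ≤ x := (PySem.List.mem_pyRange_one.mp hx).1
        rw [pyGetD_cons (b :: t) a x hx0, pyGetD_cons (b :: t) a (x + 1) (by omega)]

lemma foldl_add_cons : ∀ (r : List Int) (s : List Int) (x : Int), x ∉ r →
    List.foldl PySem.Set.add (x :: s) r = x :: List.foldl PySem.Set.add s r := by
  intro r
  induction r with
  | nil => intro s x _; rfl
  | cons y r ih =>
    intro s x hx
    have hxy : ¬ ((y == x) = true) := by
      simp only [beq_iff_eq]; intro h; exact hx (by simp [h])
    have hstep : PySem.Set.add (x :: s) y = x :: PySem.Set.add s y := by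
      simp [PySem.Set.add, PySem.Set.contains]
      split_ifs <;> simp_all
    simp only [List.foldl_cons, hstep]
    exact ih _ _ (fun h => hx (List.mem_cons_of_mem _ h))

lemma dedup_cons_of_not_mem (a : Int) (r : List Int) (h : a ∉ r) :
    PySem.List.dedup (a :: r) = a :: PySem.List.dedup r := by
  simp only [PySem.List.dedup_eq_ofList, PySem.Set.ofList_eq_foldl, List.foldl_cons]
  have : PySem.Set.add ([] : List Int) a = [a] := rfl
  rw [this]
  exact foldl_add_cons r [] a h

lemma dedup_dup (a : Int) (t : List Int) :
    PySem.List.dedup (a :: a :: t) = PySem.List.dedup (a :: t) := by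
  simp only [PySem.List.dedup_eq_ofList, PySem.Set.ofList_eq_foldl, List.foldl_cons]
  have h1 : PySem.Set.add ([] : List Int) a = [a] := rfl
  have h2 : PySem.Set.add [a] a = [a] := by simp [PySem.Set.add, PySem.Set.contains]
  rw [h1, h2]

/-- Core: on a nondecreasing nonempty list, the number of run-starts among its
distinct values is the gap count plus one. -/
lemma core : ∀ (ss : List Int), ss.Pairwise (· ≤ ·) → ss ≠ [] →
    (((PySem.List.dedup ss).countP (fun x => decide (¬ (x - 1) ∈ ss)) : Int)
      = countGaps ss + 1) := by
  intro ss
  induction ss with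
  | nil => intro _ h; exact absurd rfl h
  | cons a s ih =>
    match s, ih with
    | [], _ =>
      intro _ _
      have : PySem.List.dedup [a] = [a] := by
        rw [dedup_cons_of_not_mem a [] (by simp)]; rfl
      rw [this]
      simp [countGaps]
    | b :: t, ih =>
      intro h hne
      have ha : ∀ y ∈ b :: t, a ≤ y := (List.pairwise_cons.mp h).1
      have htail : (b :: t).Pairwise (· ≤ ·) := (List.pairwise_cons.mp h).2
      have hb : ∀ y ∈ t, b ≤ y := (List.pairwise_cons.mp htail).1
      by_cases hab : a = b
      · subst hab
        rw [dedup_dup]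
        have hcong : (PySem.List.dedup (a :: t)).countP (fun x => decide (¬ (x - 1) ∈ a :: a :: t))
            = (PySem.List.dedup (a :: t)).countP (fun x => decide (¬ (x - 1) ∈ a :: t)) := by
          apply List.countP_congr
          intro x _
          simp only [decide_eq_true_iff, List.mem_cons]
          tauto
        rw [hcong, ih htail (by simp)]
        simp only [countGaps]
        have : ¬ (1 < a - a) := by omega
        rw [if_neg this]
        ring
      · have hab' : a < b := lt_of_le_of_ne (ha b (by simp)) hab
        have hanotin : a ∉ b :: t := by
          intro hmem
          rcases List.mem_cons.mp hmem with h1 | h1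
          · exact hab h1
          · exact absurd (hb a h1) (by omega)
        rw [dedup_cons_of_not_mem a (b :: t) hanotin, List.countP_cons]
        have hpa : (decide (¬ (a - 1) ∈ a :: b :: t)) = true := by
          simp only [decide_eq_true_iff, List.mem_cons, not_or]
          exact ⟨by omega, by omega, fun hm => by have := hb _ hm; omega⟩
        by_cases hb1 : b = a + 1
        · -- b continues a's run: b loses its run-start status inside a :: b :: t
          set d := PySem.List.dedup (b :: t) with hd
          have hbd : b ∈ d := (PySem.List.mem_dedup _ _).mpr (by simp)
          have hnd : d.Nodup := PySem.List.nodup_dedup _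
          have hperm : d.Perm (b :: d.erase b) := List.perm_cons_erase hbd
          have hE : ∀ x ∈ d.erase b,
              ((decide (¬ (x - 1) ∈ a :: b :: t)) = true ↔ (decide (¬ (x - 1) ∈ b :: t)) = true) := by
            intro x hx
            have hxb : x ≠ b := (List.Nodup.mem_erase_iff hnd).mp hx |>.1
            have hxd : x ∈ d := (List.Nodup.mem_erase_iff hnd).mp hx |>.2
            have hxmem : x ∈ b :: t := (PySem.List.mem_dedup _ _).mp hxd
            have hxge : b ≤ x := by
              rcases List.mem_cons.mp hxmem with h1 | h1
              · omega
              · exact hb _ h1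
            simp only [decide_eq_true_iff, List.mem_cons, not_or]
            constructor
            · rintro ⟨_, h2, h3⟩; exact ⟨h2, h3⟩
            · rintro ⟨h2, h3⟩; exact ⟨by omega, h2, h3⟩
          have hcb : (decide (¬ (b - 1) ∈ a :: b :: t)) = false := by
            simp [List.mem_cons]; omega
          have hcb' : (decide (¬ (b - 1) ∈ b :: t)) = true := by
            simp only [decide_eq_true_iff, List.mem_cons, not_or]
            exact ⟨by omega, fun hm => by have := hb _ hm; omega⟩
          have e1 : d.countP (fun x => decide (¬ (x - 1) ∈ a :: b :: t))
              = (d.erase b).countP (fun x => decide (¬ (x - 1) ∈ a :: b :: t)) := by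
            rw [hperm.countP_eq, List.countP_cons, hcb]
            simp
          have e2 : (d.erase b).countP (fun x => decide (¬ (x - 1) ∈ a :: b :: t))
              = (d.erase b).countP (fun x => decide (¬ (x - 1) ∈ b :: t)) :=
            List.countP_congr hE
          have e3 : d.countP (fun x => decide (¬ (x - 1) ∈ b :: t))
              = (d.erase b).countP (fun x => decide (¬ (x - 1) ∈ b :: t)) + 1 := by
            rw [hperm.countP_eq, List.countP_cons, hcb']
            simp
          have hIH := ih htail (by simp)
          have hgap : countGaps (a :: b :: t) = countGaps (b :: t) := by
            simp only [countGaps]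
            have : ¬ (1 < b - a) := by omega
            rw [if_neg this]
            ring
          rw [hpa, hgap]
          push_cast
          simp only [if_pos]
          omega
        · -- real gap between a and b: everything in b :: t keeps its run-start status
          have hcong : (PySem.List.dedup (b :: t)).countP (fun x => decide (¬ (x - 1) ∈ a :: b :: t))
              = (PySem.List.dedup (b :: t)).countP (fun x => decide (¬ (x - 1) ∈ b :: t)) := by
            apply List.countP_congr
            intro x hx
            have hxmem : x ∈ b :: t := (PySem.List.mem_dedup _ _).mp hx
            have hxge : b ≤ x := by
              rcases List.mem_cons.mp hxmem with h1 | h1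
              · omega
              · exact hb _ h1
            simp only [decide_eq_true_iff, List.mem_cons, not_or]
            constructor
            · rintro ⟨_, h2, h3⟩; exact ⟨h2, h3⟩
            · rintro ⟨h2, h3⟩; exact ⟨by omega, h2, h3⟩
          have hIH := ih htail (by simp)
          have hgap : countGaps (a :: b :: t) = 1 + countGaps (b :: t) := by
            simp only [countGaps]
            have : (1 < b - a) := by omega
            rw [if_pos this]
          rw [hpa, hcong, hgap]
          push_cast
          simp only [if_pos]
          omega

lemma countGaps_short (s : List Int) (h : s.length ≤ 2) : countGaps s ≤ 1 := by
  match s, h with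
  | [], _ => simp [countGaps]
  | [a], _ => simp [countGaps]
  | [a, b], _ => simp only [countGaps]; split_ifs <;> omega

/-- B's run-start sum equals the run-start count over the dedup of the sorted list. -/
lemma alt_starts (arr : List Int) :
    ((PySem.Set.ofList arr).map
        (fun x => if PySem.Set.contains (PySem.Set.ofList arr) (x - 1) then (0 : Int) else 1)).sum
      = ((PySem.List.dedup (PySem.List.sorted arr (fun x => x) false)).countP
          (fun x => decide (¬ (x - 1) ∈ PySem.List.sorted arr (fun x => x) false)) : Int) := by
  have hflip : ∀ (c : Bool), (if c then (0 : Int) else 1) = (if (!c) then 1 else 0) := by decide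
  simp only [hflip]
  rw [PySem.List.sum_map_ite_one_zero]
  have h1 : (PySem.Set.ofList arr).countP (fun x => !(PySem.Set.contains (PySem.Set.ofList arr) (x - 1)))
      = (PySem.Set.ofList arr).countP (fun x => decide (¬ (x - 1) ∈ arr)) := by
    apply List.countP_congr
    intro x _
    simp only [PySem.Set.contains, List.contains_eq_mem, PySem.Set.mem_ofList]
    cases em (x - 1 ∈ arr) with
    | inl h => simp [h]
    | inr h => simp [h]
  rw [h1]
  have hperm : (PySem.Set.ofList arr).Perm (PySem.List.dedup (PySem.List.sorted arr (fun x => x) false)) := by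
    rw [← PySem.List.dedup_eq_ofList]
    rw [List.perm_ext_iff_of_nodup (PySem.List.nodup_dedup _) (PySem.List.nodup_dedup _)]
    intro y
    rw [PySem.List.mem_dedup, PySem.List.mem_dedup, PySem.List.mem_sorted]
  rw [hperm.countP_eq]
  congr 1
  apply List.countP_congr
  intro x _
  simp only [decide_eq_true_iff, PySem.List.mem_sorted]

lemma ports_agree (arr : List Int) : valid_combination_py arr = valid_combination_py_alt arr := by
  unfold valid_combination_py valid_combination_py_alt
  simp only []
  rcases arr with _ | ⟨a, rest⟩
  · decide
  · set arr := a :: rest with harr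
    set ss := PySem.List.sorted arr (fun x => x) false with hss
    have hlen : ss.length = arr.length := (PySem.List.sorted_perm arr _ _).length_eq
    have hne : ss ≠ [] := by
      intro h0; rw [h0] at hlen; simp [harr] at hlen
    have hpair : ss.Pairwise (· ≤ ·) := PySem.List.sorted_pairwise arr (fun x => x)
    have hstarts := alt_starts arr
    rw [← hss] at hstarts
    have hcore := core ss hpair hne
    rw [hstarts, hcore]
    by_cases hbig : 2 < ss.length
    · rw [if_pos hbig, foldGaps]
      rw [decide_eq_decide]
      omega
    · rw [if_neg hbig]
      have := countGaps_short ss (by omega)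
      rw [decide_eq_decide]
      omega

-- ===== VERDICT (by name: the statement is the Claim_ definition above) =====
theorem valid_combination_py_spec : Claim_equal_valid_combination_py := by
  intro arr _
  unfold Spec_valid_combination_py
  exact ports_agree arr
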